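-- pv_equiv track=rewrite | github.com/olostak/Boolean-Network-Identifiability | aproximative_method.py | generate_expression
-- ===== SOURCE A (Python) =====
-- def generate_operations(x, nodes):
--     y = x % nodes
--     if y == 0:
--         return "and"
--     elif y == 1:
--         return "or"
--
-- def generate_expression(bf, nodes):
--     expression = ""
--     n = round((len(bf) + 0.5) / 2)
--     for j in range(n):
--         a = bf[j]
--         if a < 0:
--             expression += "int(not {" + str((a * -1) - 1) + "}) "
--         else:
--             expression += "{" + str(a) + "} "
--         if (j + n) < len(bf):
--             expression += f"{generate_operations(bf[j + n], nodes)} "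
--     return expression
-- ===== SOURCE B (Python) =====
-- def generate_operations(x, nodes):
--     y = x % nodes
--     if y == 0:
--         return "and"
--     elif y == 1:
--         return "or"
--
-- def generate_expression(bf, nodes):
--     n = (len(bf) + 1) // 2
--     operands = bf[:n]      # stack, consumed from the top (= end of the list)
--     operators = bf[n:]     # stack, consumed from the top
--     parts = []             # tokens collected back-to-front
--     while operands:
--         # the operand on top of the stack carries an operator exactly while
--         # both stacks have the same height
--         if len(operators) == len(operands):
--             parts.append(f"{generate_operations(operators.pop(), nodes)} ")
--         a = operands.pop()
--         parts.append("int(not {" + str(-a - 1) + "}) " if a < 0 else "{" + str(a) + "} ")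
--     parts.reverse()
--     return "".join(parts)
-- ===== Notes on version B (the rewrite author's own statement) =====
-- stated objective: alternative
-- what changed: A builds the string front-to-back in one index loop over range(n) with a per-iteration bounds test bf[j+n] to fetch the matching operator; B builds the token sequence back-to-front from two explicit stacks popped from the end (operator emitted before its operand, pairing decided by a stack-height-equality invariant instead of index arithmetic) and reverses the collected tokens before joining.
import Mathlib
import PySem

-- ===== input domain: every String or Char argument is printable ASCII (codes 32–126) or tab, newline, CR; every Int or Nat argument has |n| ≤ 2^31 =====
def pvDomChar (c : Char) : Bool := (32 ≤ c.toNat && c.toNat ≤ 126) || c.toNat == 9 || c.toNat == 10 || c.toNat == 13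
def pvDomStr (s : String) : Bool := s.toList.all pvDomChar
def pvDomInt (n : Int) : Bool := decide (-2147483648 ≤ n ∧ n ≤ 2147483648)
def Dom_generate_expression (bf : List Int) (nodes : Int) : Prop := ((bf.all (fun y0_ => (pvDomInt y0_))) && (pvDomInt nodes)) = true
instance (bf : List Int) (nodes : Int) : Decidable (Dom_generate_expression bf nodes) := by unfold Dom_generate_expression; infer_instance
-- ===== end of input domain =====

-- B replaces A's single index loop (with a per-iteration bounds test for the operator) by
-- splitting bf into its operand and operator halves and consuming both lists head-by-head
-- with a structural recursion (objective: alternative).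

-- ===== PORT A =====
-- generate_operations returns "and"/"or" or falls off the end (None); ported as Option String.
def generate_operations (x : Int) (nodes : Int) : Option String :=
  let y := PySem.Int.mod x nodes
  if y = 0 then some "and"
  else if y = 1 then some "or"
  else none

-- f"{o}" where o : Option String renders None as "None"
def pyFormatOptStr (o : Option String) : String :=
  match o with
  | some s => s
  | none => "None"

def generate_expression (bf : List Int) (nodes : Int) : String :=
  -- round((len(bf) + 0.5) / 2) is exact float arithmetic for len(bf) ≤ 2^31 and never a .5 tie,
  -- so it equals ceil(len/2) = (len+1) // 2.
  let n : Int := ((bf.length : Int) + 1) / 2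
  (PySem.List.pyRange 0 n 1).foldl (fun expression j =>
    let a := PySem.List.pyGetD bf j 0
    let expression :=
      if a < 0 then expression ++ "int(not {" ++ PySem.Int.toStr (a * (-1) - 1) ++ "}) "
      else expression ++ "{" ++ PySem.Int.toStr a ++ "} "
    if j + n < (bf.length : Int) then
      expression ++ pyFormatOptStr (generate_operations (PySem.List.pyGetD bf (j + n) 0) nodes) ++ " "
    else expression) ""

-- ===== PORT B =====
-- Source B's while loop: two explicit stacks popped from the end, tokens collected
-- back-to-front, then reversed and joined. list.pop() is only ever called on a
-- nonempty list there, so it is ported exactly by getLastD/dropLast.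
-- generate_operations and the None-formatting are the same code as A's; those helpers are shared.
def loopGE (nodes : Int) (operands operators : List Int) (parts : List String) : List String :=
  if operands.isEmpty then parts
  else
    let po :=
      if operators.length = operands.length then
        (parts ++ [pyFormatOptStr (generate_operations (operators.getLastD 0) nodes) ++ " "],
         operators.dropLast)
      else (parts, operators)
    let a := operands.getLastD 0
    let parts := po.1 ++ [if a < 0 then "int(not {" ++ PySem.Int.toStr (-a - 1) ++ "}) "
                          else "{" ++ PySem.Int.toStr a ++ "} "]
    loopGE nodes operands.dropLast po.2 parts
termination_by operands.length
decreasing_by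
  cases operands with
  | nil => simp_all
  | cons b t => simp

def generate_expression_alt (bf : List Int) (nodes : Int) : String :=
  let n : Nat := (bf.length + 1) / 2
  PySem.Str.join "" (List.reverse (loopGE nodes (bf.take n) (bf.drop n) []))

-- ===== PRECONDITION & SPEC =====
-- Pre_ excludes nodes = 0 when the loop reaches an operator slot (len(bf) ≥ 2):
-- there Python's `x % nodes` raises ZeroDivisionError.
def Pre_generate_expression (bf : List Int) (nodes : Int) : Prop := bf.length ≤ 1 ∨ nodes ≠ 0
instance (bf : List Int) (nodes : Int) : Decidable (Pre_generate_expression bf nodes) := by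
  unfold Pre_generate_expression; infer_instance

def pvWitness_generate_expression : List Int × Int := ([1, -2, 0, 3], 2)

def Spec_generate_expression (bf : List Int) (nodes : Int) (out : String) : Prop := out = generate_expression_alt bf nodes
instance (bf : List Int) (nodes : Int) (out : String) : Decidable (Spec_generate_expression bf nodes out) := by unfold Spec_generate_expression; infer_instance

-- ===== CLAIM (what is proved, stated in full; the proofs are below) =====
def Claim_equal_generate_expression : Prop := ∀ (bf : List Int) (nodes : Int), Dom_generate_expression bf nodes → Pre_generate_expression bf nodes → Spec_generate_expression bf nodes (generate_expression bf nodes)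

-- ===== LEMMAS AND PROOFS =====

-- the token A's iteration j contributes
def tokAt (bf : List Int) (nodes : Int) (n j : Nat) : String :=
  (if bf.getD j 0 < 0 then "int(not {" ++ PySem.Int.toStr (bf.getD j 0 * (-1) - 1) ++ "}) "
   else "{" ++ PySem.Int.toStr (bf.getD j 0) ++ "} ") ++
  (if j + n < bf.length then
     pyFormatOptStr (generate_operations (bf.getD (j + n) 0) nodes) ++ " "
   else "")

-- the token B's recursion step j contributes, phrased over the two half-lists
def tok2 (xs ys : List Int) (nodes : Int) (j : Nat) : String :=
  (if xs.getD j 0 < 0 then "int(not {" ++ PySem.Int.toStr (-(xs.getD j 0) - 1) ++ "}) "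
   else "{" ++ PySem.Int.toStr (xs.getD j 0) ++ "} ") ++
  (if j < ys.length then pyFormatOptStr (generate_operations (ys.getD j 0) nodes) ++ " " else "")

lemma foldl_strcat {α : Type} (g : α → String) (l : List α) (init : String) :
    l.foldl (fun s x => s ++ g x) init =
      init ++ String.ofList ((l.map (fun x => (g x).toList)).flatten) := by
  induction l generalizing init with
  | nil =>
    simp only [List.map_nil, List.flatten_nil, List.foldl_nil]
    exact (String.append_eq_left_iff.mpr rfl).symm
  | cons a t ih => simp [ih, String.ofList_append, String.append_assoc]

lemma toksA (bf : List Int) (nodes : Int) :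
    generate_expression bf nodes =
      String.ofList ((((List.range ((bf.length + 1) / 2)).map (tokAt bf nodes ((bf.length + 1) / 2))).map
        String.toList).flatten) := by
  show (PySem.List.pyRange 0 (((bf.length : Int) + 1) / 2) 1).foldl _ "" = _
  have hn : (((bf.length : Int) + 1) / 2) = (((bf.length + 1) / 2 : Nat) : Int) := by omega
  rw [hn, PySem.List.pyRange_one]
  simp only [Int.sub_zero, Int.toNat_natCast, List.foldl_map]
  have hf : (fun (expression : String) (k : Nat) =>
      let j : Int := 0 + (k : Int)
      let a := PySem.List.pyGetD bf j 0
      let expression :=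
        if a < 0 then expression ++ "int(not {" ++ PySem.Int.toStr (a * (-1) - 1) ++ "}) "
        else expression ++ "{" ++ PySem.Int.toStr a ++ "} "
      if j + (((bf.length + 1) / 2 : Nat) : Int) < (bf.length : Int) then
        expression ++ pyFormatOptStr (generate_operations (PySem.List.pyGetD bf (j + (((bf.length + 1) / 2 : Nat) : Int)) 0) nodes) ++ " "
      else expression)
      = fun s k => s ++ tokAt bf nodes ((bf.length + 1) / 2) k := by
    funext s k
    dsimp only
    rw [show ((0 : Int) + (k : Int)) = ((k : Nat) : Int) from by ring]
    rw [show ((k : Int) + (((bf.length + 1) / 2 : Nat) : Int)) = ((k + (bf.length + 1) / 2 : Nat) : Int) from by push_cast; ring]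
    rw [PySem.List.pyGetD_natCast, PySem.List.pyGetD_natCast]
    unfold tokAt
    by_cases hc : k + (bf.length + 1) / 2 < bf.length
    · rw [if_pos (show ((k + (bf.length + 1) / 2 : Nat) : Int) < (bf.length : Int) by exact_mod_cast hc),
        if_pos hc]
      split_ifs <;> simp [String.append_assoc]
    · rw [if_neg (show ¬ ((k + (bf.length + 1) / 2 : Nat) : Int) < (bf.length : Int) by exact_mod_cast hc),
        if_neg hc]
      split_ifs <;> simp [String.append_assoc]
  rw [hf, foldl_strcat]
  simp [Function.comp_def]

lemma joinEmpty (parts : List String) :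
    PySem.Str.join "" parts = String.ofList ((parts.map String.toList).flatten) := by
  have h : ∀ (l : List (List Char)), List.intercalate [] l = l.flatten := by
    intro l
    induction l with
    | nil => simp [List.intercalate]
    | cons a t ih => cases t <;> simp_all [List.intercalate, List.intersperse]
  simp [PySem.Str.join, PySem.Chars.join, h]

-- the loop's collected parts, reversed and flattened to characters, are the forward
-- token sequence (tok2) followed by the accumulator's characters
lemma loopGE_chars (nodes : Int) (xs : List Int) : ∀ (ys : List Int) (parts : List String),
    ys.length ≤ xs.length →
    (((loopGE nodes xs ys parts).reverse).map String.toList).flatten =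
      (((List.range xs.length).map (tok2 xs ys nodes)).map String.toList).flatten ++
        ((parts.reverse).map String.toList).flatten := by
  induction xs using List.reverseRecOn with
  | nil =>
    intro ys parts h
    rw [loopGE]
    simp
  | append_singleton xs' a ih =>
    intro ys parts h
    rw [loopGE, if_neg (by simp : ¬ ((xs' ++ [a]).isEmpty = true))]
    simp only [List.dropLast_concat, List.getLastD_concat, List.length_append,
      List.length_cons, List.length_nil]
    by_cases hy : ys.length = xs'.length + 1
    · rw [if_pos hy]
      obtain ⟨ws, v, rfl⟩ : ∃ ws v, ys = ws ++ [v] := by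
        cases ys using List.reverseRecOn with
        | nil => simp at hy
        | append_singleton ws v => exact ⟨ws, v, rfl⟩
      have hws : ws.length = xs'.length := by
        simpa using hy
      simp only [List.dropLast_concat, List.getLastD_concat]
      rw [ih ws _ (by omega)]
      rw [List.range_succ, List.map_append, List.map_append, List.flatten_append]
      have htoks : (List.range xs'.length).map (tok2 (xs' ++ [a]) (ws ++ [v]) nodes)
          = (List.range xs'.length).map (tok2 xs' ws nodes) := by
        apply List.map_congr_left
        intro j hj
        rw [List.mem_range] at hj
        unfold tok2
        rw [List.getD_append _ _ _ _ hj, List.getD_append _ _ _ _ (by omega)]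
        have h1 : j < (ws ++ [v]).length := by simp only [List.length_append, List.length_cons, List.length_nil]; omega
        have h2 : j < ws.length := by omega
        rw [if_pos h1, if_pos h2]
      rw [htoks]
      have htok : tok2 (xs' ++ [a]) (ws ++ [v]) nodes xs'.length =
          (if a < 0 then "int(not {" ++ PySem.Int.toStr (-a - 1) ++ "}) "
           else "{" ++ PySem.Int.toStr a ++ "} ") ++
          (pyFormatOptStr (generate_operations v nodes) ++ " ") := by
        unfold tok2
        rw [List.getD_append_right _ _ _ _ (Nat.le_refl _),
          List.getD_append_right _ _ _ _ (by omega)]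
        simp [hws]
      simp [htok, String.append_assoc]
    · rw [if_neg hy]
      have h' : ys.length ≤ xs'.length + 1 := by simpa using h
      have hle : ys.length ≤ xs'.length := by omega
      rw [ih ys _ hle]
      rw [List.range_succ, List.map_append, List.map_append, List.flatten_append]
      have htoks : (List.range xs'.length).map (tok2 (xs' ++ [a]) ys nodes)
          = (List.range xs'.length).map (tok2 xs' ys nodes) := by
        apply List.map_congr_left
        intro j hj
        rw [List.mem_range] at hj
        unfold tok2
        rw [List.getD_append _ _ _ _ hj]
      rw [htoks]
      have htok : tok2 (xs' ++ [a]) ys nodes xs'.length =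
          (if a < 0 then "int(not {" ++ PySem.Int.toStr (-a - 1) ++ "}) "
           else "{" ++ PySem.Int.toStr a ++ "} ") := by
        unfold tok2
        rw [List.getD_append_right _ _ _ _ (Nat.le_refl _),
          if_neg (by omega : ¬ xs'.length < ys.length)]
        simp
      simp [htok, String.append_assoc]

lemma toksB (bf : List Int) (nodes : Int) :
    generate_expression_alt bf nodes =
      String.ofList ((((List.range ((bf.length + 1) / 2)).map (tokAt bf nodes ((bf.length + 1) / 2))).map
        String.toList).flatten) := by
  unfold generate_expression_alt
  dsimp only
  rw [joinEmpty]
  have hle : (bf.length + 1) / 2 ≤ bf.length := by omega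
  have hlen : (bf.take ((bf.length + 1) / 2)).length = (bf.length + 1) / 2 := by
    simp [hle]
  have hdl : (bf.drop ((bf.length + 1) / 2)).length = bf.length - (bf.length + 1) / 2 := by simp
  rw [loopGE_chars nodes _ _ [] (by omega)]
  rw [hlen]
  simp only [List.reverse_nil, List.map_nil, List.flatten_nil, List.append_nil]
  congr 2
  simp only [List.map_map]
  apply List.map_congr_left
  intro j hj
  rw [List.mem_range] at hj
  simp only [Function.comp_apply]
  apply congrArg
  unfold tok2 tokAt
  have hjL : j < bf.length := by omega
  have h1 : (bf.take ((bf.length + 1) / 2)).getD j 0 = bf.getD j 0 := by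
    rw [List.getD_eq_getElem _ _ (by omega : j < (bf.take ((bf.length + 1) / 2)).length),
        List.getElem_take, List.getD_eq_getElem _ _ hjL]
  rw [h1, hdl]
  by_cases hc : j < bf.length - (bf.length + 1) / 2
  · rw [if_pos hc, if_pos (by omega : j + (bf.length + 1) / 2 < bf.length)]
    have h2 : (bf.drop ((bf.length + 1) / 2)).getD j 0 = bf.getD (j + (bf.length + 1) / 2) 0 := by
      rw [List.getD_eq_getElem _ _ (by simp; omega),
          List.getElem_drop, List.getD_eq_getElem _ _ (by omega : j + (bf.length + 1) / 2 < bf.length)]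
      congr 1
      omega
    rw [h2]
    split_ifs with h <;> simp
  · rw [if_neg hc, if_neg (by omega : ¬ j + (bf.length + 1) / 2 < bf.length)]
    split_ifs with h <;> simp

-- ===== VERDICT (by name: the statement is the Claim_ definition above) =====
theorem generate_expression_spec : Claim_equal_generate_expression := by
  intro bf nodes _ _
  unfold Spec_generate_expression
  rw [toksA, toksB]
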